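-- pv_equiv track=rewrite | github.com/aligator81/docmind | backend/app/services/enhanced_document_processor.py | _find_section_end
-- ===== SOURCE A (Python) =====
-- def _find_section_end(content: str, start_position: int) -> int:
--     """
--     Find the end of the current section (table)
--     """
--     # Look for next major section marker
--     section_markers = [
--         "\n\n## ",
--         "\n\n# ",
--         "\n\n--- Page",
--         "\n\n**Table",
--         "\n\n<!-- TABLE"
--     ]
--
--     min_position = len(content)
--     for marker in section_markers:
--         marker_pos = content.find(marker, start_position + 1)
--         if marker_pos >= 0 and marker_pos < min_position:
--             min_position = marker_pos
--
--     return min_position if min_position < len(content) else len(content)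
-- ===== SOURCE B (Python) =====
-- def _find_section_end(content: str, start_position: int) -> int:
--     """All section markers begin with a blank line, so jump between '\n\n'
--     occurrences and check what follows, instead of a separate scan per marker."""
--     heads = ("## ", "# ", "--- Page", "**Table", "<!-- TABLE")
--     pos = content.find("\n\n", start_position + 1)
--     while pos >= 0:
--         if content.startswith(heads, pos + 2):
--             return pos
--         pos = content.find("\n\n", pos + 1)
--     return len(content)
-- ===== Notes on version B (the rewrite author's own statement) =====
-- stated objective: alternative
-- what changed: Exploits that every marker starts with a blank line: one find('\n\n') loop that jumps between blank-line occurrences and checks the following text against the five marker tails, instead of five full content.find scans plus a running-minimum loop.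
import Mathlib
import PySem

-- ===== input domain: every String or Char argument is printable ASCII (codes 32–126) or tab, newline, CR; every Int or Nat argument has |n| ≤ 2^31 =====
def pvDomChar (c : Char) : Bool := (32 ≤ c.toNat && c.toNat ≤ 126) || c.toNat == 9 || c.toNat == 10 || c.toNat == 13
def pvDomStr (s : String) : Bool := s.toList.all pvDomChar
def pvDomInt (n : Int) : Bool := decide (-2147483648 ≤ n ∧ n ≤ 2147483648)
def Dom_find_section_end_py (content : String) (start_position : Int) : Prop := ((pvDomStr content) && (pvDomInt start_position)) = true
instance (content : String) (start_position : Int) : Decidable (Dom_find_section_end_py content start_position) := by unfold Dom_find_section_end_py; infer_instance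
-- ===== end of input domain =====

-- B exploits that every marker starts with a blank line: one find("\n\n") loop that
-- jumps between blank-line occurrences and checks the five marker tails (objective: alternative).

-- ===== PORT A =====

-- the marker list ("\n\n## ", "\n\n# ", "\n\n--- Page", "\n\n**Table", "\n\n<!-- TABLE")
def pvMarkers : List (List Char) :=
  ["\n\n## ".toList, "\n\n# ".toList, "\n\n--- Page".toList, "\n\n**Table".toList,
   "\n\n<!-- TABLE".toList]

-- Python's str.find start clamp: negative start counts from the end, floored at 0
def pvClampStart (n : Nat) (start : Int) : Nat :=
  (if start < 0 then max 0 ((n : Int) + start) else start).toNat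

-- scan of Python's str.find(sub, start): first index ≥ i where m is a prefix, else -1
-- (hand port, exact for nonempty sub, which all markers are)
def pvFindAux (m : List Char) : List Char → Nat → Int
  | [], i => if m.isPrefixOf ([] : List Char) then (i : Int) else -1
  | c :: tl, i => if m.isPrefixOf (c :: tl) then (i : Int) else pvFindAux m tl (i + 1)

-- content.find(marker, start)
def pvFindFrom (cs : List Char) (m : List Char) (start : Int) : Int :=
  let begin := pvClampStart cs.length start
  pvFindAux m (cs.drop begin) begin

-- A's loop body: keep the smallest nonnegative find position
def pvMinStep (cs : List Char) (start : Int) (acc : Int) (m : List Char) : Int :=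
  let pos := pvFindFrom cs m start
  if 0 ≤ pos ∧ pos < acc then pos else acc

def find_section_end_py (content : String) (start_position : Int) : Int :=
  let cs := content.toList
  let n : Int := cs.length
  let min_position := pvMarkers.foldl (pvMinStep cs (start_position + 1)) n
  if min_position < n then min_position else n

-- ===== PORT B =====

-- the marker tails after the leading blank line
def pvHeads : List (List Char) :=
  ["## ".toList, "# ".toList, "--- Page".toList, "**Table".toList, "<!-- TABLE".toList]

-- the shared two-newline prefix
def pvNN : List Char := "\n\n".toList

-- content.find("\n\n", start)
def pvFind2 (cs : List Char) (start : Int) : Int :=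
  pvFindAux pvNN (cs.drop (pvClampStart cs.length start)) (pvClampStart cs.length start)

-- B's while loop, structural on fuel: pos is the current find("\n\n") result (-1 = no
-- more blank lines); each iteration moves the search start strictly right, so
-- cs.length + 1 rounds of fuel always suffice (proved in pvScan_loop below)
def pvLoopB (cs : List Char) : Nat → Int → Int
  | 0, _ => (cs.length : Int)
  | fuel + 1, pos =>
      if 0 ≤ pos then
        if pvHeads.any (fun hd => hd.isPrefixOf (cs.drop (pos.toNat + 2))) then pos
        else pvLoopB cs fuel (pvFind2 cs (pos + 1))
      else (cs.length : Int)

def find_section_end_py_alt (content : String) (start_position : Int) : Int :=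
  let cs := content.toList
  pvLoopB cs (cs.length + 1) (pvFind2 cs (start_position + 1))

-- ===== PRECONDITION & SPEC =====
def Spec_find_section_end_py (content : String) (start_position : Int) (out : Int) : Prop := out = find_section_end_py_alt content start_position
instance (content : String) (start_position : Int) (out : Int) : Decidable (Spec_find_section_end_py content start_position out) := by unfold Spec_find_section_end_py; infer_instance

-- ===== CLAIM (what is proved, stated in full; the proofs are below) =====
def Claim_equal_find_section_end_py : Prop := ∀ (content : String) (start_position : Int), Dom_find_section_end_py content start_position → Spec_find_section_end_py content start_position (find_section_end_py content start_position)

-- ===== LEMMAS AND PROOFS =====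

-- common reference point: first index ≥ i where any full marker starts, else n
def pvScan (n : Nat) : List Char → Nat → Int
  | [], _ => (n : Int)
  | c :: tl, i =>
      if pvMarkers.any (fun m => m.isPrefixOf (c :: tl)) then (i : Int)
      else pvScan n tl (i + 1)

-- generic running-minimum step over an arbitrary position function P
def pvStep (P : List Char → Int) (acc : Int) (m : List Char) : Int :=
  if 0 ≤ P m ∧ P m < acc then P m else acc

-- A's loop step is the generic step at P = pvFindFrom
lemma pvMinStep_eq_step (cs : List Char) (st : Int) :
    pvMinStep cs st = pvStep (fun m => pvFindFrom cs m st) := rfl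

-- a fold whose positions are all -1 keeps its accumulator
lemma pvFold_none (P : List Char → Int) (ms : List (List Char))
    (hall : ∀ m ∈ ms, P m = -1) :
    ∀ acc : Int, ms.foldl (pvStep P) acc = acc := by
  induction ms with
  | nil => intro acc; simp
  | cons m tl ih =>
      intro acc
      simp only [List.foldl_cons, pvStep, hall m (by simp)]
      norm_num
      exact ih (fun m hm => hall m (List.mem_cons_of_mem _ hm)) acc

-- pvFindAux is -1 or ≥ the starting index
lemma pvFindAux_ge (m : List Char) (s : List Char) :
    ∀ i : Nat, pvFindAux m s i = -1 ∨ (i : Int) ≤ pvFindAux m s i := by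
  induction s with
  | nil => intro i; unfold pvFindAux; split_ifs <;> simp
  | cons c tl ih =>
      intro i
      unfold pvFindAux
      split_ifs with h
      · right; simp
      · rcases ih (i + 1) with h1 | h1
        · left; exact h1
        · right; refine le_trans ?_ h1; push_cast; omega

-- the fold never exceeds its accumulator
lemma pvFold_le (P : List Char → Int) (ms : List (List Char)) :
    ∀ acc : Int, ms.foldl (pvStep P) acc ≤ acc := by
  induction ms with
  | nil => intro acc; simp
  | cons m tl ih =>
      intro acc
      simp only [List.foldl_cons]
      refine le_trans (ih _) ?_
      unfold pvStep
      split_ifs with h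
      · exact le_of_lt h.2
      · exact le_rfl

-- once the accumulator is i, with all positions -1 or ≥ i, it stays i
lemma pvFold_stay (P : List Char → Int) (i : Nat) (ms : List (List Char))
    (hge : ∀ m ∈ ms, P m = -1 ∨ (i : Int) ≤ P m) :
    ms.foldl (pvStep P) (i : Int) = (i : Int) := by
  induction ms with
  | nil => simp
  | cons m tl ih =>
      simp only [List.foldl_cons]
      have hm := hge m (by simp)
      have hstep : pvStep P (i : Int) m = (i : Int) := by
        unfold pvStep
        rcases hm with h | h
        · simp [h]
        · split_ifs with h2
          · omega
          · rfl
      rw [hstep]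
      exact ih (fun m hm => hge m (List.mem_cons_of_mem _ hm))

-- if some position is i and all are -1 or ≥ i, the fold from acc > i is i
lemma pvFold_hit (P : List Char → Int) (i : Nat) (ms : List (List Char))
    (hge : ∀ m ∈ ms, P m = -1 ∨ (i : Int) ≤ P m)
    (hex : ∃ m ∈ ms, P m = (i : Int)) :
    ∀ acc : Int, (i : Int) < acc → ms.foldl (pvStep P) acc = (i : Int) := by
  induction ms with
  | nil => rcases hex with ⟨m, hm, _⟩; simp at hm
  | cons m tl ih =>
      intro acc hacc
      simp only [List.foldl_cons]
      have hgtl : ∀ m ∈ tl, P m = -1 ∨ (i : Int) ≤ P m :=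
        fun m hm => hge m (List.mem_cons_of_mem _ hm)
      rcases hex with ⟨m', hm', hval⟩
      rcases List.mem_cons.mp hm' with rfl | hm'tl
      · have hstep : pvStep P acc m' = (i : Int) := by
          unfold pvStep
          rw [hval]
          have : (0 : Int) ≤ (i : Int) := Int.natCast_nonneg i
          simp [this, hacc]
        rw [hstep]
        exact pvFold_stay P i tl hgtl
      · have hstep : pvStep P acc m = (i : Int) ∨ ((i : Int) < pvStep P acc m) := by
          unfold pvStep
          rcases hge m (by simp) with h | h
          · right; simp [h, hacc]
          · split_ifs with h2
            · omega
            · right; exact hacc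
        rcases hstep with h | h
        · rw [h]; exact pvFold_stay P i tl hgtl
        · exact ih hgtl ⟨m', hm'tl, hval⟩ _ h

-- cons equation of pvFindAux
lemma pvFindAux_cons (m : List Char) (c : Char) (tl : List Char) (i : Nat) :
    pvFindAux m (c :: tl) i =
      if m.isPrefixOf (c :: tl) then (i : Int) else pvFindAux m tl (i + 1) := rfl

-- all markers are nonempty
lemma pvMarkers_ne_nil : ∀ m ∈ pvMarkers, m ≠ [] := by decide

-- first half: A's running minimum over five find positions equals pvScan
lemma pvKeyGen (n : Nat) :
    ∀ (tl : List Char) (i : Nat), (tl ≠ [] → i + tl.length ≤ n) →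
      pvMarkers.foldl (pvStep (fun m => pvFindAux m tl i)) ((n : Int)) = pvScan n tl i := by
  intro tl
  induction tl with
  | nil =>
      intro i _
      rw [pvScan]
      refine pvFold_none _ pvMarkers (fun m hm => ?_) _
      unfold pvFindAux
      simp [List.isPrefixOf_iff_prefix, pvMarkers_ne_nil m hm]
  | cons c ttl ih =>
      intro i hlen
      cases hany : pvMarkers.any (fun m => m.isPrefixOf (c :: ttl)) with
      | true =>
          rw [pvScan, hany]
          simp only [if_true]
          rcases List.any_eq_true.mp hany with ⟨m, hm, hp⟩
          have hi : i < n := by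
            have := hlen (by simp)
            simp at this; omega
          refine pvFold_hit _ i pvMarkers
            (fun m _ => pvFindAux_ge m (c :: ttl) i) ⟨m, hm, ?_⟩ _ (by exact_mod_cast hi)
          unfold pvFindAux; simp [hp]
      | false =>
          have hstep : ∀ acc : Int, ∀ m ∈ pvMarkers,
              pvStep (fun m => pvFindAux m (c :: ttl) i) acc m =
              pvStep (fun m => pvFindAux m ttl (i + 1)) acc m := by
            intro acc m hm
            have hnp := List.any_eq_false.mp hany m hm
            have : pvFindAux m (c :: ttl) i = pvFindAux m ttl (i + 1) := by
              rw [pvFindAux_cons, if_neg hnp]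
            simp only [pvStep, this]
          rw [PySem.List.foldl_congr_mem pvMarkers _ _ _ hstep]
          rw [pvScan, hany]
          simp only [Bool.false_eq_true, if_false]
          exact ih (i + 1) (fun hne => by
            have := hlen (by simp)
            simp at this ⊢; omega)

-- a prefix of an append splits into a prefix plus a prefix of the drop
lemma pvPrefix_append (a b l : List Char) :
    (a ++ b).isPrefixOf l = (a.isPrefixOf l && b.isPrefixOf (l.drop a.length)) := by
  induction a generalizing l with
  | nil => simp
  | cons x a' ih =>
      cases l with
      | nil => simp [List.isPrefixOf]
      | cons y l' => simp [List.isPrefixOf, ih, Bool.and_assoc]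

-- markers = "\n\n" ++ heads, pointwise
lemma pvMarkers_eq_map : pvMarkers = pvHeads.map (fun h => pvNN ++ h) := by decide

-- a marker starts at tl iff "\n\n" starts there and some head starts two places later
lemma pvMarker_split (tl : List Char) :
    pvMarkers.any (fun m => m.isPrefixOf tl) =
      (pvNN.isPrefixOf tl && pvHeads.any (fun hd => hd.isPrefixOf (tl.drop 2))) := by
  rw [pvMarkers_eq_map, List.any_map]
  show pvHeads.any (fun hd => (pvNN ++ hd).isPrefixOf tl) = _
  cases hp : pvNN.isPrefixOf tl with
  | true =>
      simp only [Bool.true_and]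
      congr 1
      funext hd
      rw [pvPrefix_append, hp, Bool.true_and]
      rfl
  | false =>
      simp only [Bool.false_and]
      refine List.any_eq_false.mpr (fun hd _ => ?_)
      rw [pvPrefix_append, hp, Bool.false_and]
      simp

-- second half: B's blank-line-jumping loop equals pvScan
lemma pvScan_loop (cs : List Char) :
    ∀ (tl : List Char) (i : Nat) (fuel : Nat), tl = cs.drop i → tl.length < fuel →
      pvScan cs.length tl i = pvLoopB cs fuel (pvFindAux pvNN tl i) := by
  intro tl
  induction tl with
  | nil =>
      intro i fuel _ hfuel
      obtain ⟨f, rfl⟩ : ∃ f, fuel = f + 1 := ⟨fuel - 1, by omega⟩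
      have hfind : pvFindAux pvNN ([] : List Char) i = -1 := by
        unfold pvFindAux
        simp [List.isPrefixOf_iff_prefix]
        decide
      rw [hfind, pvScan, pvLoopB]
      norm_num
  | cons c ttl ih =>
      intro i fuel hdrop hfuel
      obtain ⟨f, rfl⟩ : ∃ f, fuel = f + 1 := ⟨fuel - 1, by omega⟩
      have httl : ttl = cs.drop (i + 1) := by
        have : cs.drop (i + 1) = (cs.drop i).drop 1 := by
          rw [List.drop_drop]
        rw [this, ← hdrop]
        rfl
      have hdrop2 : (c :: ttl).drop 2 = cs.drop (i + 2) := by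
        have : cs.drop (i + 2) = (cs.drop i).drop 2 := by
          rw [List.drop_drop]
        rw [this, ← hdrop]
      rw [pvScan, pvMarker_split]
      cases hnn : pvNN.isPrefixOf (c :: ttl) with
      | true =>
          have hfind : pvFindAux pvNN (c :: ttl) i = (i : Int) := by
            rw [pvFindAux_cons, if_pos hnn]
          rw [hfind, pvLoopB]
          have h0 : (0 : Int) ≤ (i : Int) := Int.natCast_nonneg i
          rw [if_pos h0]
          have htn : ((i : Int)).toNat = i := Int.toNat_natCast i
          rw [htn, ← hdrop2]
          cases hhd : pvHeads.any (fun hd => hd.isPrefixOf ((c :: ttl).drop 2)) with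
          | true => simp
          | false =>
              simp only [Bool.true_and, Bool.false_eq_true, if_false]
              have hf2 : pvFind2 cs ((i : Int) + 1) = pvFindAux pvNN ttl (i + 1) := by
                unfold pvFind2 pvClampStart
                have h1 : ¬ ((i : Int) + 1 < 0) := by omega
                rw [if_neg h1]
                have h2 : ((i : Int) + 1).toNat = i + 1 := by omega
                rw [h2, ← httl]
              rw [hf2]
              exact ih (i + 1) f httl (by simp at hfuel ⊢; omega)
      | false =>
          simp only [Bool.false_and, Bool.false_eq_true, if_false]
          have hfind : pvFindAux pvNN (c :: ttl) i = pvFindAux pvNN ttl (i + 1) := by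
            rw [pvFindAux_cons, if_neg (by simp [hnn])]
          rw [hfind]
          exact ih (i + 1) (f + 1) httl (by simp at hfuel ⊢; omega)

-- ===== VERDICT (by name: the statement is the Claim_ definition above) =====
theorem find_section_end_py_spec : Claim_equal_find_section_end_py := by
  intro content start_position _
  unfold Spec_find_section_end_py
  show (let cs := content.toList
        let n : Int := cs.length
        let min_position := pvMarkers.foldl (pvMinStep cs (start_position + 1)) n
        if min_position < n then min_position else n) = find_section_end_py_alt content start_position
  set cs := content.toList with hcs
  set b := pvClampStart cs.length (start_position + 1) with hb
  have hBalt : find_section_end_py_alt content start_position =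
      pvLoopB cs (cs.length + 1) (pvFindAux pvNN (cs.drop b) b) := rfl
  have hkey : pvMarkers.foldl (pvMinStep cs (start_position + 1)) ((cs.length : Int)) =
      pvScan cs.length (cs.drop b) b := by
    rw [pvMinStep_eq_step]
    have hff : (fun m => pvFindFrom cs m (start_position + 1)) =
        (fun m => pvFindAux m (cs.drop b) b) := rfl
    rw [hff]
    refine pvKeyGen cs.length (cs.drop b) b (fun hne => ?_)
    have hlt : b < cs.length := by
      by_contra hge
      exact hne (List.drop_eq_nil_of_le (le_of_not_gt hge))
    simp only [List.length_drop]
    omega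
  have hscan : pvScan cs.length (cs.drop b) b =
      pvLoopB cs (cs.length + 1) (pvFindAux pvNN (cs.drop b) b) :=
    pvScan_loop cs (cs.drop b) b (cs.length + 1) rfl
      (by simp only [List.length_drop]; omega)
  have hle : pvMarkers.foldl (pvMinStep cs (start_position + 1)) ((cs.length : Int)) ≤
      (cs.length : Int) := by
    rw [pvMinStep_eq_step]; exact pvFold_le _ pvMarkers _
  -- the scan result is ≤ n as well, so the final min-vs-n branch is the identity
  simp only []
  rw [hBalt, ← hscan]
  split_ifs with h
  · exact hkey
  · omega
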